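-- pv_equiv track=rewrite | github.com/ruishengguo/leetcode-solution | Hard/Solution1830.py | get_i_j
-- ===== SOURCE A (Python) =====
-- from typing import Tuple
--
-- def get_i_j(s: str) -> Tuple[int, int]:
--     """for test"""
--     i, j, l = 0, 0, len(s)
--     for index, item in enumerate(s):
--         if index == 0:
--             continue
--         if s[index] < s[index - 1]:
--             i = index
--     index, temp = i, s[i - 1]
--     for _ in s[i:]:
--         if s[index] >= temp:
--             j = index - 1
--             break
--         index += 1
--         if index == l:
--             j = index - 1
--     return i, j
-- ===== SOURCE B (Python) =====
-- def get_i_j(s):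
--     # i = start of the maximal non-decreasing suffix (the last descent index, or 0)
--     i = len(s) - 1
--     while i > 0 and s[i - 1] <= s[i]:
--         i -= 1
--     temp = s[i - 1]
--     # the suffix s[i:] is non-decreasing, so binary-search the first index >= temp
--     lo, hi = i, len(s)
--     while lo < hi:
--         mid = (lo + hi) // 2
--         if s[mid] < temp:
--             lo = mid + 1
--         else:
--             hi = mid
--     return i, lo - 1
-- ===== Notes on version B (the rewrite author's own statement) =====
-- stated objective: alternative
-- what changed: i is found as the start of the maximal non-decreasing suffix by a backward while-walk, and j is computed by a BINARY SEARCH (bisect_left by hand) for the first index >= temp over that suffix, which is valid because the suffix after the last descent is sorted; A instead does a full forward descent-tracking pass plus a linear scan with break/fallthrough.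
-- outside the precondition, e.g. on get_i_j(''): A raises IndexError, B raises IndexError
import Mathlib
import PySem

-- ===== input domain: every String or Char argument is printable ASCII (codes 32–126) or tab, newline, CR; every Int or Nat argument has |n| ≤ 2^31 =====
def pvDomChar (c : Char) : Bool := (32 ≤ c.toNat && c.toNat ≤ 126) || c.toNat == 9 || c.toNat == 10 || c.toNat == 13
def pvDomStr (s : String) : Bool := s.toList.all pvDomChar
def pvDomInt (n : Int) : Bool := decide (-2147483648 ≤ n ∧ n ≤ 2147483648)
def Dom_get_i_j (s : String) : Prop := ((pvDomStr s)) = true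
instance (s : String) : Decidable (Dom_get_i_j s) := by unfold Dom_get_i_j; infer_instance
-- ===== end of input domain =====

-- B finds i as the start of the maximal non-decreasing suffix by a backward while-walk and
-- computes j by BINARY SEARCH over that sorted suffix instead of A's linear scan; objective:
-- alternative. A raises IndexError on the empty string (s[-1]), so Pre_ requires s ≠ "".


-- ===== PORT A =====
-- second loop of A: 'for _ in s[i:]' with mutable index/j and a break
def pvLoopA (cs : List Char) (temp : Char) (l : Int) : List Char → Int → Int → Int
  | [], _, j => j
  | _ :: rest, index, j =>
      if temp ≤ PySem.List.pyGetD cs index ' ' then index - 1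
      else
        let index' := index + 1
        pvLoopA cs temp l rest index' (if index' == l then index' - 1 else j)

def get_i_j (s : String) : Int × Int :=
  let cs := s.toList
  let l : Int := cs.length
  -- first loop over enumerate(s); indices stay in range so pyGetD is exact here
  let i : Int := (PySem.List.enumerate cs 0).foldl
    (fun i p =>
      if p.1 == 0 then i
      else if PySem.List.pyGetD cs p.1 ' ' < PySem.List.pyGetD cs (p.1 - 1) ' ' then p.1 else i) 0
  -- temp = s[i-1]; Pre_ excludes s = "", the only input where this raises
  let temp := PySem.List.pyGetD cs (i - 1) ' '
  let j := pvLoopA cs temp l (PySem.List.slice cs (some i) none) i 0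
  (i, j)

-- ===== PORT B =====
-- backward while-walk: i = len(s)-1; while i > 0 and s[i-1] <= s[i]: i -= 1
def pvWalk (cs : List Char) : Nat → Nat
  | 0 => 0
  | k + 1 => if cs.getD k ' ' ≤ cs.getD (k + 1) ' ' then pvWalk cs k else k + 1

-- binary search: while lo < hi: mid=(lo+hi)//2; if s[mid]<temp: lo=mid+1 else hi=mid
-- (fuel = hi - lo bounds the iterations; all indices are nonnegative so Nat is exact)
def pvBSearch (cs : List Char) (temp : Char) : Nat → Nat → Nat → Nat
  | 0, lo, _ => lo
  | f + 1, lo, hi =>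
      if lo < hi then
        if cs.getD ((lo + hi) / 2) ' ' < temp then pvBSearch cs temp f ((lo + hi) / 2 + 1) hi
        else pvBSearch cs temp f lo ((lo + hi) / 2)
      else lo

def get_i_j_alt (s : String) : Int × Int :=
  let cs := s.toList
  let i := pvWalk cs (cs.length - 1)
  let temp := PySem.List.pyGetD cs ((i : Int) - 1) ' '
  let lo := pvBSearch cs temp (cs.length - i) i cs.length
  ((i : Int), (lo : Int) - 1)

-- ===== PRECONDITION & SPEC =====
-- A raises IndexError on s = "" (temp = s[-1]); B raises there too, so it is excluded.
def Pre_get_i_j (s : String) : Prop := s ≠ ""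
instance (s : String) : Decidable (Pre_get_i_j s) := by unfold Pre_get_i_j; infer_instance
def pvWitness_get_i_j : String := "cba"

def Spec_get_i_j (s : String) (out : Int × Int) : Prop := out = get_i_j_alt s
instance (s : String) (out : Int × Int) : Decidable (Spec_get_i_j s out) := by unfold Spec_get_i_j; infer_instance

-- ===== CLAIM (what is proved, stated in full; the proofs are below) =====
def Claim_equal_get_i_j : Prop := ∀ (s : String), Dom_get_i_j s → Pre_get_i_j s → Spec_get_i_j s (get_i_j s)

-- ===== LEMMAS AND PROOFS =====

-- the linear scan A's second loop performs, as a reference function shared by both proofs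
def pvFwdScan (cs : List Char) (temp : Char) : Nat → Nat → Nat
  | idx, 0 => idx
  | idx, n + 1 => if temp ≤ cs.getD idx ' ' then idx else pvFwdScan cs temp (idx + 1) n

theorem pvWalk_le (cs : List Char) (n : Nat) : pvWalk cs n ≤ n := by
  induction n with
  | zero => simp [pvWalk]
  | succ n ih => simp only [pvWalk]; split <;> omega

theorem pvWalk_append (cs : List Char) (c : Char) (n : Nat) (h : n < cs.length) :
    pvWalk (cs ++ [c]) n = pvWalk cs n := by
  induction n with
  | zero => simp [pvWalk]
  | succ n ih =>
    have h1 : (cs ++ [c]).getD (n + 1) ' ' = cs.getD (n + 1) ' ' := by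
      simp [List.getD, List.getElem?_append_left h]
    have h2 : (cs ++ [c]).getD n ' ' = cs.getD n ' ' := by
      simp [List.getD, List.getElem?_append_left (by omega : n < cs.length)]
    simp only [pvWalk, h1, h2]
    split
    · exact ih (by omega)
    · rfl

-- the suffix starting at the walk's result is non-decreasing (adjacent form)
theorem pvWalk_sorted (cs : List Char) (n : Nat) :
    ∀ k, pvWalk cs n ≤ k → k < n → cs.getD k ' ' ≤ cs.getD (k + 1) ' ' := by
  induction n with
  | zero => omega
  | succ n ih =>
    intro k hk hkn
    simp only [pvWalk] at hk
    split at hk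
    · rcases Nat.lt_or_ge k n with h | h
      · exact ih k hk h
      · have : k = n := by omega
        subst this; assumption
    · omega

-- monotone closure of adjacent sortedness
theorem pvWalk_mono (cs : List Char) (n : Nat) :
    ∀ a b, pvWalk cs n ≤ a → a ≤ b → b ≤ n → cs.getD a ' ' ≤ cs.getD b ' ' := by
  intro a b ha hab hbn
  induction b with
  | zero => have : a = 0 := by omega
            subst this; rfl
  | succ b ihb =>
    rcases Nat.lt_or_ge a (b + 1) with h | h
    · exact le_trans (ihb (by omega) (by omega)) (pvWalk_sorted cs n b (by omega) (by omega))
    · have : a = b + 1 := by omega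
      subst this; rfl

-- A's first loop computes pvWalk (as Int)
theorem foldA_eq_walk (cs : List Char) :
    (PySem.List.enumerate cs 0).foldl
      (fun i p =>
        if p.1 == 0 then i
        else if PySem.List.pyGetD cs p.1 ' ' < PySem.List.pyGetD cs (p.1 - 1) ' ' then p.1 else i) 0
    = ((pvWalk cs (cs.length - 1) : Nat) : Int) := by
  induction cs using List.reverseRecOn with
  | nil => simp [pvWalk]
  | append_singleton ys c ih =>
    rw [PySem.List.enumerate_append, List.foldl_append]
    have hcong :
        (PySem.List.enumerate ys 0).foldl
          (fun i p =>
            if p.1 == 0 then i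
            else if PySem.List.pyGetD (ys ++ [c]) p.1 ' ' < PySem.List.pyGetD (ys ++ [c]) (p.1 - 1) ' '
              then p.1 else i) 0
        = (PySem.List.enumerate ys 0).foldl
          (fun i p =>
            if p.1 == 0 then i
            else if PySem.List.pyGetD ys p.1 ' ' < PySem.List.pyGetD ys (p.1 - 1) ' ' then p.1 else i) 0 := by
      apply PySem.List.foldl_congr_mem
      intro a p hp
      rcases (PySem.List.mem_enumerate_iff _ _ _).1 hp with ⟨k, hk, rfl⟩
      simp only [zero_add]
      by_cases hk0 : k = 0
      · subst hk0; simp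
      · have hkk : ((k : Int) == 0) = false := by
          rw [beq_eq_false_iff_ne]; omega
        rw [hkk]
        simp only [Bool.false_eq_true, if_false]
        have e1 : PySem.List.pyGetD (ys ++ [c]) (k : Int) ' ' = PySem.List.pyGetD ys (k : Int) ' ' := by
          simp [PySem.List.pyGetD_natCast, List.getD, List.getElem?_append_left hk]
        have e2 : PySem.List.pyGetD (ys ++ [c]) ((k : Int) - 1) ' ' = PySem.List.pyGetD ys ((k : Int) - 1) ' ' := by
          have : ((k : Int) - 1) = ((k - 1 : Nat) : Int) := by omega
          rw [this]
          simp [PySem.List.pyGetD_natCast, List.getD,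
            List.getElem?_append_left (by omega : k - 1 < ys.length)]
        rw [e1, e2]
    rw [hcong, ih]
    simp only [PySem.List.enumerate_cons, PySem.List.enumerate_nil, List.foldl_cons, List.foldl_nil,
      zero_add]
    rcases Nat.eq_zero_or_pos ys.length with h0 | hpos
    · have hnil : ys = [] := List.length_eq_zero_iff.mp h0
      subst hnil
      simp [pvWalk]
    · have hne : ((ys.length : Int) == 0) = false := by rw [beq_eq_false_iff_ne]; omega
      rw [hne]
      simp only [Bool.false_eq_true, if_false]
      have hlen : (ys ++ [c]).length - 1 = ys.length := by simp
      obtain ⟨m, hm⟩ : ∃ m, ys.length = m + 1 := ⟨ys.length - 1, by omega⟩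
      have e1 : PySem.List.pyGetD (ys ++ [c]) ((ys.length : Int)) ' ' = (ys ++ [c]).getD ys.length ' ' := by
        simp [PySem.List.pyGetD_natCast]
      have e2 : PySem.List.pyGetD (ys ++ [c]) ((ys.length : Int) - 1) ' ' = (ys ++ [c]).getD (ys.length - 1) ' ' := by
        have : ((ys.length : Int) - 1) = ((ys.length - 1 : Nat) : Int) := by omega
        rw [this]; simp [PySem.List.pyGetD_natCast]
      rw [e1, e2, hlen, hm]
      simp only [Nat.add_sub_cancel]
      show _ = ((pvWalk (ys ++ [c]) (m + 1) : Nat) : Int)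
      simp only [pvWalk]
      split
      · next h => rw [if_neg (not_le_of_gt h)]
      · next h => rw [if_pos (le_of_not_gt h), pvWalk_append ys c m (by omega)]

-- A's second loop computes pvFwdScan - 1 (the rest list only matters through its length)
theorem loopA_eq_fwdScan (cs : List Char) (temp : Char) :
    ∀ (n idx : Nat) (rest : List Char) (j : Int), rest.length = n → idx + n = cs.length → 1 ≤ n →
      pvLoopA cs temp (cs.length : Int) rest (idx : Int) j
        = ((pvFwdScan cs temp idx n : Nat) : Int) - 1 := by
  intro n
  induction n with
  | zero => omega
  | succ m ih =>
    intro idx rest j hlen hsum _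
    obtain ⟨x, rest', rfl⟩ : ∃ x rest', rest = x :: rest' := by
      cases rest with
      | nil => simp at hlen
      | cons a b => exact ⟨a, b, rfl⟩
    simp only [pvLoopA, pvFwdScan, PySem.List.pyGetD_natCast]
    split
    · ring
    · have hlen' : rest'.length = m := by simpa using hlen
      cases m with
      | zero =>
        have : ((idx : Int) + 1 == (cs.length : Int)) = true := by
          rw [beq_iff_eq]; omega
        rw [List.length_eq_zero_iff.mp hlen']
        simp only [pvLoopA, this, if_true, pvFwdScan]
        push_cast; omega
      | succ m' =>
        have hne : ((idx : Int) + 1 == (cs.length : Int)) = false := by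
          rw [beq_eq_false_iff_ne]; omega
        rw [hne]
        simp only [Bool.false_eq_true, if_false]
        have := ih (idx + 1) rest' j hlen' (by omega) (by omega)
        push_cast at this ⊢
        convert this using 2

-- binary-search invariant: result r is i ≤ r ≤ n, everything in [i,r) is < temp,
-- and cs[r] ≥ temp if r < n — provided the searched segment is sorted (via pvWalk_mono)
theorem bsearch_char (cs : List Char) (temp : Char) (i nn : Nat)
    (hmono : ∀ a b, i ≤ a → a ≤ b → b ≤ nn - 1 → cs.getD a ' ' ≤ cs.getD b ' ') :
    ∀ (f lo hi : Nat), i ≤ lo → lo ≤ hi → hi ≤ nn → hi - lo ≤ f →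
      (∀ m, i ≤ m → m < lo → cs.getD m ' ' < temp) →
      (∀ m, hi ≤ m → m < nn → temp ≤ cs.getD m ' ') →
      i ≤ pvBSearch cs temp f lo hi ∧ pvBSearch cs temp f lo hi ≤ nn ∧
      (∀ m, i ≤ m → m < pvBSearch cs temp f lo hi → cs.getD m ' ' < temp) ∧
      (pvBSearch cs temp f lo hi < nn → temp ≤ cs.getD (pvBSearch cs temp f lo hi) ' ') := by
  intro f
  induction f with
  | zero =>
    intro lo hi hil hlh hhn hf hlow hhigh
    have he : lo = hi := by omega
    subst he
    simp only [pvBSearch]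
    exact ⟨hil, by omega, hlow, fun h => hhigh lo (le_refl _) h⟩
  | succ f ihf =>
    intro lo hi hil hlh hhn hf hlow hhigh
    simp only [pvBSearch]
    by_cases hlt : lo < hi
    · rw [if_pos hlt]
      set mid := (lo + hi) / 2 with hmid
      have hm1 : lo ≤ mid := by omega
      have hm2 : mid < hi := by omega
      by_cases hc : cs.getD mid ' ' < temp
      · rw [if_pos hc]
        apply ihf (mid + 1) hi (by omega) (by omega) hhn (by omega)
        · intro m him hm
          rcases Nat.lt_or_ge m lo with h | h
          · exact hlow m him h
          · exact lt_of_le_of_lt (hmono m mid (by omega) (by omega) (by omega)) hc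
        · exact hhigh
      · rw [if_neg hc]
        apply ihf lo mid hil (by omega) (by omega) (by omega) hlow
        intro m hm hmn
        exact le_trans (le_of_not_gt hc) (hmono mid m (by omega) hm (by omega))
    · rw [if_neg hlt]
      have : lo = hi := by omega
      subst this
      exact ⟨hil, by omega, hlow, fun h => hhigh lo (le_refl _) h⟩

-- the linear scan reaches exactly the index characterized by the invariant above
theorem fwdScan_of_char (cs : List Char) (temp : Char) (i nn r : Nat)
    (hin : i ≤ r) (hrn : r ≤ nn)
    (hlow : ∀ m, i ≤ m → m < r → cs.getD m ' ' < temp)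
    (hhit : r < nn → temp ≤ cs.getD r ' ') :
    ∀ (f idx : Nat), f = nn - idx → i ≤ idx → idx ≤ r →
      pvFwdScan cs temp idx f = r := by
  intro f
  induction f with
  | zero =>
    intro idx hfn hi1 hi2
    have : idx = r := by omega
    simpa [pvFwdScan] using this
  | succ f ihf =>
    intro idx hfn hi1 hi2
    simp only [pvFwdScan]
    rcases Nat.lt_or_ge idx r with h | h
    · have hc : ¬ temp ≤ cs.getD idx ' ' := not_le_of_gt (hlow idx hi1 h)
      rw [if_neg hc]
      exact ihf (idx + 1) (by omega) (by omega) (by omega)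
    · have : idx = r := by omega
      subst this
      rw [if_pos (hhit (by omega))]

-- ===== VERDICT (by name: the statement is the Claim_ definition above) =====
theorem get_i_j_spec : Claim_equal_get_i_j := by
  intro s _ hpre
  unfold Spec_get_i_j get_i_j get_i_j_alt
  have hne : s.toList ≠ [] := by
    intro h
    exact hpre (by simpa using congrArg String.ofList h)
  set cs := s.toList with hcs
  have hL : 1 ≤ cs.length := List.length_pos_iff.mpr hne
  show
    (let i : Int := (PySem.List.enumerate cs 0).foldl
        (fun i p =>
          if p.1 == 0 then i
          else if PySem.List.pyGetD cs p.1 ' ' < PySem.List.pyGetD cs (p.1 - 1) ' ' then p.1 else i) 0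
     let temp := PySem.List.pyGetD cs (i - 1) ' '
     (i, pvLoopA cs temp (cs.length : Int) (PySem.List.slice cs (some i) none) i 0))
    = (let i := pvWalk cs (cs.length - 1)
       let temp := PySem.List.pyGetD cs ((i : Int) - 1) ' '
       ((i : Int), ((pvBSearch cs temp (cs.length - i) i cs.length : Nat) : Int) - 1))
  simp only
  rw [foldA_eq_walk cs]
  set iN := pvWalk cs (cs.length - 1) with hiN
  have hile : iN ≤ cs.length - 1 := pvWalk_le cs (cs.length - 1)
  have hslice : PySem.List.slice cs (some ((iN : Nat) : Int)) none = cs.drop iN :=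
    PySem.List.slice_from_natCast cs iN
  rw [hslice]
  set temp := PySem.List.pyGetD cs ((iN : Int) - 1) ' ' with htemp
  have hdroplen : (cs.drop iN).length = cs.length - iN := by simp
  rw [loopA_eq_fwdScan cs temp (cs.length - iN) iN (cs.drop iN) 0 hdroplen (by omega) (by omega)]
  -- both sides are now fwdScan vs bsearch; connect them through the invariant
  have hmono := pvWalk_mono cs (cs.length - 1)
  obtain ⟨h1, h2, h3, h4⟩ := bsearch_char cs temp iN cs.length
    (fun a b ha hab hb => hmono a b ha hab hb)
    (cs.length - iN) iN cs.length (le_refl _) (by omega) (le_refl _) (le_refl _)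
    (by omega) (by omega)
  rw [fwdScan_of_char cs temp iN cs.length (pvBSearch cs temp (cs.length - iN) iN cs.length)
    h1 h2 h3 h4 (cs.length - iN) iN rfl (le_refl _) h1]
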